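-- pv_equiv track=rewrite | github.com/stefanrzv2000/crypto | T7/util.py | prepareDes
-- ===== SOURCE A (Python) =====
-- def toBinArray(x,len):
--     s = []
--     b = 1<<(len-1)
--     while(b > 0):
--         if(x>=b): s.append(1); x = x-b
--         else: s.append(0)
--         b = b>>1
--     return s
--
-- def prepareDes(s):
--     l = len(s)
--     ll = ((l-1)//8 + 1)*8
--
--     for j in range(ll - l): s = s + " "
--
--     result = []
--     part = []
--
--     for i in range(ll):
--
--         if i%8 == 0 and i > 0:
--             result.append(part)
--             part = []
--
--         xbin = toBinArray(ord(s[i]),8)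
--
--         for x in xbin:
--             part.append(x)
--
--     result.append(part)
--
--     return result
-- ===== SOURCE B (Python) =====
-- def prepareDes(s):
--     blocks = []
--     rest = s
--     while rest:
--         chunk = rest[:8]
--         rest = rest[8:]
--         chunk = chunk + " " * (8 - len(chunk))
--         n = 0
--         for c in chunk:
--             n = n * 256 + ord(c)
--         blocks.append([n // 2**(63 - k) % 2 for k in range(64)])
--     return blocks
-- ===== Notes on version B (the rewrite author's own statement) =====
-- stated objective: alternative
-- what changed: Instead of A's per-character 8-bit arrays appended under an i%8==0 boundary-detection flush, B consumes the string 8 characters at a time in a while loop, packs each chunk into a single 64-bit integer by repeated n=n*256+ord(c), and emits that integer's 64 bits, so no per-character bit lists or block-boundary bookkeeping exist.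
-- intended difference: On the empty string A returns [[]] (one empty block, an artefact of its unconditional final result.append(part)), while B returns [] (no blocks), the intended value since an empty input has no 64-bit DES blocks. — e.g. on prepareDes(""): A returns [[]], B returns []
import Mathlib
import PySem

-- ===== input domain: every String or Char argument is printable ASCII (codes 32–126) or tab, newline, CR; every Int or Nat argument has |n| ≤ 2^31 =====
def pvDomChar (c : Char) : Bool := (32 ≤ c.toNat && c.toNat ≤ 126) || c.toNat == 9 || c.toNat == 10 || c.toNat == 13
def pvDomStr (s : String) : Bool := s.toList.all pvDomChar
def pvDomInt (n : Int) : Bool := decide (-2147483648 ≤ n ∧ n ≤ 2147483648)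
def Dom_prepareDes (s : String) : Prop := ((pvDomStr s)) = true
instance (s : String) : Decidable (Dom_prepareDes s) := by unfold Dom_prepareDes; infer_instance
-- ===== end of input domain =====

-- B replaces A's per-character bit arrays with boundary-detection flush by a while loop that packs each
-- 8-character chunk into one 64-bit integer and emits its bits (alternative, same cost);
-- intended difference: on the empty string A returns [[]], B returns [].


-- ===== PORT A =====
-- while-loop of toBinArray, ported with a fuel bound (the loop exits on b ≤ 0 exactly as Python; fuel ≥ trip count)
def toBinLoop : Nat → Int → Int → List Int
  | 0, _, _ => []
  | fuel + 1, x, b =>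
    if 0 < b then
      if x ≥ b then 1 :: toBinLoop fuel (x - b) (b >>> 1)
      else 0 :: toBinLoop fuel x (b >>> 1)
    else []

-- 1 << (len-1): len = 8 at the only call site, so (len-1).toNat is exact
def toBinArray (x len : Int) : List Int :=
  toBinLoop (((1 : Int) <<< (len - 1).toNat).toNat + 1) x ((1 : Int) <<< (len - 1).toNat)

def prepareDes (s : String) : List (List Int) :=
  let l : Int := PySem.Str.len s
  let ll : Int := (PySem.Int.floordiv (l - 1) 8 + 1) * 8
  -- for j in range(ll - l): s = s + " "
  let s2 : List Char := (PySem.List.pyRange 0 (ll - l) 1).foldl (fun acc _ => acc ++ [' ']) s.toList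
  let st := (PySem.List.pyRange 0 ll 1).foldl
    (fun (st : List (List Int) × List Int) i =>
      let st := if PySem.Int.mod i 8 = 0 ∧ 0 < i then (st.1 ++ [st.2], ([] : List Int)) else st
      -- s[i]: 0 ≤ i < ll = len(s2), so the default of pyGetD is never read
      let xbin := toBinArray ((PySem.List.pyGetD s2 i ' ').toNat : Int) 8
      (st.1, xbin.foldl (fun p x => p ++ [x]) st.2))
    ([], ([] : List Int))
  st.1 ++ [st.2]

-- ===== PORT B =====
-- while rest: chunk = rest[:8]; rest = rest[8:]; chunk += " "*(8-len(chunk)); n = fold of n*256+ord(c);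
-- emit [n // 2**(63-k) % 2 for k in range(64)].  (2**(63-k): 0 ≤ 63-k on range(64), so toNat is exact.)
-- The while loop is ported with a fuel bound; the loop runs ceil(len/8) ≤ len+1 times, so fuel len+1 is enough.
def prepareDesLoop : Nat → List Char → List (List Int)
  | 0, _ => []
  | _ + 1, [] => []
  | fuel + 1, c :: rest' =>
    let cs := c :: rest'
    let chunk0 := PySem.List.slice cs none (some 8)
    let chunk := chunk0 ++ List.replicate ((8 - (chunk0.length : Int))).toNat ' '
    let n := chunk.foldl (fun (a : Int) ch => a * 256 + (ch.toNat : Int)) 0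
    ((PySem.List.pyRange 0 64 1).map (fun k =>
      PySem.Int.mod (PySem.Int.floordiv n ((2 : Int) ^ ((63 : Int) - k).toNat)) 2))
      :: prepareDesLoop fuel (PySem.List.slice cs (some 8) none)

def prepareDes_alt (s : String) : List (List Int) := prepareDesLoop (s.toList.length + 1) s.toList



-- ===== PRECONDITION & SPEC =====
-- On the empty string A returns [[]] (an artefact of its unconditional final result.append(part));
-- B returns [], the intended value: an empty input has no 64-bit DES blocks.
def D_prepareDes (s : String) : Prop := s = ""
instance (s : String) : Decidable (D_prepareDes s) := by unfold D_prepareDes; infer_instance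

def Spec_prepareDes (s : String) (out : List (List Int)) : Prop := ¬ D_prepareDes s → out = prepareDes_alt s
instance (s : String) (out : List (List Int)) : Decidable (Spec_prepareDes s out) := by unfold Spec_prepareDes; infer_instance

def pvDiffWitness_prepareDes : String := ""
def pvDiffWitnessOut_prepareDes : (List (List Int)) × (List (List Int)) := ([[]], [])

-- ===== CLAIM (what is proved, stated in full; the proofs are below) =====
def Claim_unchanged_prepareDes : Prop := ∀ (s : String), Dom_prepareDes s → Spec_prepareDes s (prepareDes s)
def Claim_changed_prepareDes : Prop := Dom_prepareDes (pvDiffWitness_prepareDes) ∧ D_prepareDes (pvDiffWitness_prepareDes) ∧ prepareDes (pvDiffWitness_prepareDes) = pvDiffWitnessOut_prepareDes.1 ∧ prepareDes_alt (pvDiffWitness_prepareDes) = pvDiffWitnessOut_prepareDes.2 ∧ pvDiffWitnessOut_prepareDes.1 ≠ pvDiffWitnessOut_prepareDes.2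
def Claim_exact_prepareDes : Prop := ∀ (s : String), Dom_prepareDes s → D_prepareDes s → prepareDes s ≠ prepareDes_alt s

-- ===== LEMMAS AND PROOFS =====

-- per-character bit list as A computes it (ord c is always in 0..255 on Dom)
def binA (c : Char) : List Int := toBinArray ((c.toNat : Int)) 8

-- per-character MSB-first 8-bit list, the common reference
def binN (c : Char) : List Int :=
  [7, 6, 5, 4, 3, 2, 1, 0].map (fun k : Nat =>
    PySem.Int.mod (PySem.Int.floordiv ((c.toNat : Int)) ((2 : Int) ^ k)) 2)

-- A's loop body, with the indexed character passed explicitly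
def stepA (st : List (List Int) × List Int) (p : Int × Char) : List (List Int) × List Int :=
  let st' := if PySem.Int.mod p.1 8 = 0 ∧ 0 < p.1 then (st.1 ++ [st.2], ([] : List Int)) else st
  (st'.1, (binA p.2).foldl (fun q x => q ++ [x]) st'.2)

-- the common normal form: m blocks of 8 characters, each flattened through f
def canonF (f : Char → List Int) : Nat → List Char → List (List Int)
  | 0, _ => []
  | m + 1, cs => ((cs.take 8).flatMap f) :: canonF f m (cs.drop 8)

def bitsInt (n : Int) (w : Nat) : List Int :=
  (List.range w).map (fun k => PySem.Int.mod (PySem.Int.floordiv n ((2 : Int) ^ (w - 1 - k))) 2)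

lemma portBits (n : Int) :
    (PySem.List.pyRange 0 64 1).map (fun k =>
      PySem.Int.mod (PySem.Int.floordiv n ((2 : Int) ^ ((63 : Int) - k).toNat)) 2)
      = bitsInt n 64 := by
  rw [PySem.List.pyRange_of_pos 0 64 (by norm_num : (0:Int) < 1)]
  have hcnt : (if (0 : Int) < 64 then (((64 : Int) - 0 + 1 - 1) / 1).toNat else 0) = 64 := by decide
  rw [hcnt, List.map_map]
  unfold bitsInt
  apply List.map_congr_left
  intro k hk
  have hk64 : k < 64 := List.mem_range.mp hk
  simp only [Function.comp]
  have he : ((63 : Int) - (0 + 1 * (k : Int))).toNat = 64 - 1 - k := by omega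
  rw [he]

lemma bits_append (n x : Int) (_hn : 0 ≤ n) (hx0 : 0 ≤ x) (hx : x < 256) (w : Nat) :
    bitsInt (n * 256 + x) (w + 8) = bitsInt n w ++ bitsInt x 8 := by
  unfold bitsInt
  rw [List.range_add, List.map_append, List.map_map]
  congr 1
  · apply List.map_congr_left
    intro k hk
    have hkw : k < w := List.mem_range.mp hk
    have he : w + 8 - 1 - k = (w - 1 - k) + 8 := by omega
    rw [he, pow_add]
    have h2 : (0 : Int) < 2 ^ (w - 1 - k) := by positivity
    rw [PySem.Int.floordiv_eq_ediv_of_pos (by positivity),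
        PySem.Int.floordiv_eq_ediv_of_pos h2]
    congr 1
    rw [show ((2:Int) ^ (w-1-k) * 2 ^ 8) = 2 ^ 8 * 2 ^ (w-1-k) from by ring,
        ← Int.ediv_ediv_of_nonneg]
    · congr 1
      omega
    · norm_num
  · apply List.map_congr_left
    intro i hi
    have hi8 : i < 8 := List.mem_range.mp hi
    simp only [Function.comp]
    have he : w + 8 - 1 - (w + i) = 8 - 1 - i := by omega
    rw [he]
    rw [PySem.Int.mod_eq_emod_of_pos (by norm_num), PySem.Int.mod_eq_emod_of_pos (by norm_num),
        PySem.Int.floordiv_eq_ediv_of_pos (by positivity),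
        PySem.Int.floordiv_eq_ediv_of_pos (by positivity)]
    interval_cases i <;> norm_num <;> omega

def foldB (cs : List Char) : Int := cs.foldl (fun a ch => a * 256 + (ch.toNat : Int)) 0

lemma foldB_nonneg (cs : List Char) : 0 ≤ foldB cs := by
  suffices h : ∀ (a : Int), 0 ≤ a → 0 ≤ cs.foldl (fun a ch => a * 256 + (ch.toNat : Int)) a from
    h 0 le_rfl
  induction cs with
  | nil => intro a ha; simpa using ha
  | cons c cs ih =>
    intro a ha
    rw [List.foldl_cons]
    exact ih _ (by positivity)

lemma binN8 (c : Char) : bitsInt ((c.toNat : Int)) 8 = binN c := by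
  unfold bitsInt binN
  norm_num [show List.range 8 = [0, 1, 2, 3, 4, 5, 6, 7] from rfl]

lemma blockBits : ∀ (cs : List Char), (∀ c ∈ cs, c.toNat < 256) →
    bitsInt (foldB cs) (8 * cs.length) = cs.flatMap binN := by
  intro cs
  induction cs using List.reverseRecOn with
  | nil => intro _; rfl
  | append_singleton cs c ih =>
    intro h
    have hfold : foldB (cs ++ [c]) = foldB cs * 256 + (c.toNat : Int) := by
      unfold foldB; rw [List.foldl_append]; rfl
    have hlen : 8 * (cs ++ [c]).length = 8 * cs.length + 8 := by simp; ring
    rw [hfold, hlen, bits_append _ _ (foldB_nonneg cs) (by positivity)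
      (by exact_mod_cast h c (by simp)) _]
    rw [ih (fun x hx => h x (by simp [hx])), binN8]
    simp

lemma loop_nil (f : Nat) : prepareDesLoop f [] = [] := by cases f <;> rfl

lemma prepareDesLoop_eq : ∀ (m : Nat) (fuel : Nat) (cs : List Char), (∀ c ∈ cs, c.toNat < 256) →
    8 * m < cs.length → cs.length ≤ 8 * (m + 1) → m < fuel →
    prepareDesLoop (fuel + 1) cs
      = canonF binN (m + 1) (cs ++ List.replicate (8 * (m + 1) - cs.length) ' ') := by
  intro m
  induction m with
  | zero =>
    intro fuel cs hchars hlo hhi hf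
    match cs, hlo with
    | c :: rest, _ =>
    rw [prepareDesLoop]
    set cs := c :: rest with hcs
    have hlen8 : cs.length ≤ 8 := by omega
    have hlen1 : 1 ≤ cs.length := by rw [hcs]; simp
    have hslto : PySem.List.slice cs none (some 8) = cs := by
      rw [PySem.List.slice_to]
      · exact List.take_of_length_le (by simpa using hlen8)
      · norm_num
    have hslfrom : PySem.List.slice cs (some 8) none = [] := by
      rw [PySem.List.slice_from]
      · exact List.drop_eq_nil_of_le (by simpa using hlen8)
      · norm_num
    simp only [hslto, hslfrom, loop_nil]
    set pad : List Char := List.replicate ((8 - (cs.length : Int))).toNat ' ' with hpadd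
    have hpadn : ((8 : Int) - (cs.length : Int)).toNat = 8 * (0 + 1) - cs.length := by omega
    have hchunklen : (cs ++ pad).length = 8 := by
      rw [List.length_append, hpadd, List.length_replicate]; omega
    have hchunkchars : ∀ x ∈ cs ++ pad, x.toNat < 256 := by
      intro x hx
      rcases List.mem_append.mp hx with hx | hx
      · exact hchars x hx
      · rw [List.eq_of_mem_replicate hx]; decide
    rw [portBits, show (cs ++ pad).foldl (fun (a : Int) ch => a * 256 + (ch.toNat : Int)) 0
        = foldB (cs ++ pad) from rfl,
      show (64 : Nat) = 8 * (cs ++ pad).length from by rw [hchunklen],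
      blockBits _ hchunkchars]
    show _ = (((cs ++ List.replicate (8 * (0 + 1) - cs.length) ' ').take 8).flatMap binN) :: _
    rw [← hpadn]
    rw [List.take_of_length_le (le_of_eq hchunklen)]
    rfl
  | succ m ih =>
    intro fuel cs hchars hlo hhi hf
    match cs, hlo with
    | c :: rest, _ =>
    rw [prepareDesLoop]
    set cs := c :: rest with hcs
    have hlen8 : 8 ≤ cs.length := by omega
    have hslto : PySem.List.slice cs none (some 8) = cs.take 8 := by
      rw [PySem.List.slice_to]
      · rfl
      · norm_num
    have hslfrom : PySem.List.slice cs (some 8) none = cs.drop 8 := by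
      rw [PySem.List.slice_from]
      · rfl
      · norm_num
    have hlt : (cs.take 8).length = 8 := by simp [List.length_take]; omega
    simp only [hslto, hslfrom]
    have hpad0 : ((8 : Int) - ((cs.take 8).length : Int)).toNat = 0 := by rw [hlt]; rfl
    rw [hpad0]
    simp only [List.replicate_zero, List.append_nil]
    have hchunkchars : ∀ x ∈ cs.take 8, x.toNat < 256 := fun x hx =>
      hchars x (List.mem_of_mem_take hx)
    rw [portBits, show (cs.take 8).foldl (fun (a : Int) ch => a * 256 + (ch.toNat : Int)) 0
        = foldB (cs.take 8) from rfl,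
      show (64 : Nat) = 8 * (cs.take 8).length from by rw [hlt],
      blockBits _ hchunkchars]
    obtain ⟨f, rfl⟩ : ∃ f, fuel = f + 1 := ⟨fuel - 1, by omega⟩
    rw [ih f (cs.drop 8) (fun x hx => hchars x (List.mem_of_mem_drop hx))
      (by simp [List.length_drop]; omega) (by simp [List.length_drop]; omega) (by omega)]
    show _ = (((cs ++ List.replicate (8 * (m + 1 + 1) - cs.length) ' ').take 8).flatMap binN)
      :: canonF binN (m + 1) ((cs ++ List.replicate (8 * (m + 1 + 1) - cs.length) ' ').drop 8)
    rw [List.take_append_of_le_length hlen8, List.drop_append_of_le_length hlen8,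
      List.length_drop,
      show 8 * (m + 1) - (cs.length - 8) = 8 * (m + 1 + 1) - cs.length from by omega]

set_option maxRecDepth 20000 in
lemma bits8 : ∀ x : Nat, x < 256 → toBinArray ((x : Int)) 8 =
    [7, 6, 5, 4, 3, 2, 1, 0].map (fun k : Nat =>
      PySem.Int.mod (PySem.Int.floordiv ((x : Int)) ((2 : Int) ^ k)) 2) := by decide

lemma binA_eq_binN (c : Char) (hc : c.toNat < 256) : binA c = binN c := bits8 c.toNat hc

lemma stepA_eq (st : List (List Int) × List Int) (p : Int × Char) :
    stepA st p = if PySem.Int.mod p.1 8 = 0 ∧ 0 < p.1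
      then (st.1 ++ [st.2], binA p.2) else (st.1, st.2 ++ binA p.2) := by
  simp only [stepA]
  split_ifs with h
  · rw [PySem.List.foldl_append_singleton]; simp
  · rw [PySem.List.foldl_append_singleton]

lemma noflush : ∀ (b : List Char) (i : Int) (res : List (List Int)) (part : List Int),
    (∀ j : Int, i ≤ j → j < i + b.length → ¬(PySem.Int.mod j 8 = 0 ∧ 0 < j)) →
    (PySem.List.enumerate b i).foldl stepA (res, part) = (res, part ++ b.flatMap binA) := by
  intro b
  induction b with
  | nil => intro i res part _; simp [PySem.List.enumerate_nil]
  | cons c b ih =>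
    intro i res part h
    rw [PySem.List.enumerate_cons, List.foldl_cons, stepA_eq]
    rw [if_neg (h i le_rfl (by rw [List.length_cons]; push_cast; omega))]
    rw [ih (i + 1) res (part ++ binA c)
      (by intro j h1 h2; exact h j (by omega) (by rw [List.length_cons]; push_cast; omega))]
    simp

lemma blockFold (b : List Char) (hb : b.length = 8) (t : Nat) (ht : 1 ≤ t)
    (res : List (List Int)) (part : List Int) :
    (PySem.List.enumerate b (((8 * t : Nat) : Int))).foldl stepA (res, part)
      = (res ++ [part], b.flatMap binA) := by
  cases b with
  | nil => simp at hb
  | cons c b =>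
    rw [PySem.List.enumerate_cons, List.foldl_cons, stepA_eq]
    have hpos : PySem.Int.mod (((8 * t : Nat) : Int)) 8 = 0 ∧ 0 < (((8 * t : Nat) : Int)) := by
      constructor
      · rw [PySem.Int.mod_eq_emod_of_pos (by norm_num)]; omega
      · omega
    rw [if_pos hpos]
    have hlb : b.length = 7 := by simpa using hb
    rw [noflush b (((8 * t : Nat) : Int) + 1) (res ++ [part]) (binA c) ?side]
    · simp
    · intro j h1 h2 hcond
      rw [PySem.Int.mod_eq_emod_of_pos (by norm_num)] at hcond
      rw [hlb] at h2
      omega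

lemma mainFold (m : Nat) : ∀ (cs : List Char) (t : Nat) (res : List (List Int)) (part : List Int),
    cs.length = 8 * m → 1 ≤ t →
    (((PySem.List.enumerate cs (((8 * t : Nat) : Int))).foldl stepA (res, part)).1
      ++ [((PySem.List.enumerate cs (((8 * t : Nat) : Int))).foldl stepA (res, part)).2])
      = res ++ [part] ++ canonF binA m cs := by
  induction m with
  | zero =>
    intro cs t res part hlen ht
    have : cs = [] := List.length_eq_zero_iff.mp (by omega)
    subst this
    simp [PySem.List.enumerate_nil, canonF]
  | succ m ih =>
    intro cs t res part hlen ht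
    have hlt : (cs.take 8).length = 8 := by simp [List.length_take]; omega
    have hld : (cs.drop 8).length = 8 * m := by simp [List.length_drop]; omega
    have hstart : (((8 * t : Nat) : Int)) + ((cs.take 8).length : Int) = ((8 * (t + 1) : Nat) : Int) := by
      rw [hlt]; push_cast; ring
    conv_lhs => rw [← List.take_append_drop 8 cs, PySem.List.enumerate_append, List.foldl_append,
      blockFold _ hlt t ht, hstart]
    rw [ih (cs.drop 8) (t + 1) _ _ hld (by omega)]
    simp [canonF, List.append_assoc]

lemma padFold : ∀ (l : List Int) (acc : List Char),
    l.foldl (fun acc _ => acc ++ [' ']) acc = acc ++ List.replicate l.length ' ' := by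
  intro l
  induction l with
  | nil => simp
  | cons x l ih => intro acc; rw [List.foldl_cons, ih]; simp [List.replicate_succ]

lemma padRepl (cs : List Char) (n : Int) :
    (PySem.List.pyRange 0 n 1).foldl (fun acc _ => acc ++ [' ']) cs
      = cs ++ List.replicate n.toNat ' ' := by
  rw [padFold]
  congr 1
  rw [PySem.List.length_pyRange_one]
  congr 1
  omega

lemma flatMap_congr_chars (cs : List Char) (h : ∀ c ∈ cs, c.toNat < 256) :
    cs.flatMap binA = cs.flatMap binN :=
  List.flatMap_congr (fun c hc => binA_eq_binN c (h c hc))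

lemma canonCongr : ∀ (m : Nat) (cs : List Char), (∀ c ∈ cs, c.toNat < 256) →
    canonF binA m cs = canonF binN m cs := by
  intro m
  induction m with
  | zero => intro cs _; rfl
  | succ m ih =>
    intro cs h
    show ((cs.take 8).flatMap binA) :: canonF binA m (cs.drop 8) = _
    rw [flatMap_congr_chars _ (fun c hc => h c (List.mem_of_mem_take hc))]
    rw [ih (cs.drop 8) (fun c hc => h c (List.mem_of_mem_drop hc))]
    rfl

lemma main_eq (s : String) (hdom : Dom_prepareDes s) (hne : s ≠ "") :
    prepareDes s = prepareDes_alt s := by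
  have hne' : s.toList ≠ [] := by simp only [ne_eq, String.toList_eq_nil_iff]; exact hne
  set cs := s.toList with hcs
  set L := cs.length with hL
  have hL1 : 1 ≤ L := by
    cases hcse : cs with
    | nil => exact absurd hcse hne'
    | cons a l => rw [hL, hcse]; simp
  set M := (L - 1) / 8 + 1 with hM
  have hlen_s : PySem.Str.len s = (L : Int) := by rw [PySem.Str.len_eq]
  have hfd : PySem.Int.floordiv ((L : Int) - 1) 8 = (((L - 1) / 8 : Nat) : Int) := by
    rw [show ((L : Int) - 1) = (((L - 1 : Nat)) : Int) from by omega]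
    exact_mod_cast PySem.Int.floordiv_natCast (L - 1) 8
  have hll : (PySem.Int.floordiv ((L : Int) - 1) 8 + 1) * 8 = ((8 * M : Nat) : Int) := by
    rw [hfd]; push_cast; omega
  have hLM : L ≤ 8 * M := by omega
  have hpad : (((8 * M : Nat) : Int) - (L : Int)).toNat = 8 * M - L := by omega
  set cs2 := cs ++ List.replicate (8 * M - L) ' ' with hcs2
  have hlen2 : cs2.length = 8 * M := by
    rw [hcs2]; simp [List.length_append, List.length_replicate]; omega
  obtain ⟨Mm, hMm⟩ : ∃ k, M = k + 1 := ⟨(L - 1) / 8, rfl⟩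
  have hcschars : ∀ c ∈ cs, c.toNat < 256 := by
    intro c hc
    have hall := List.all_eq_true.mp hdom c hc
    simp only [pvDomChar, Bool.or_eq_true, Bool.and_eq_true, decide_eq_true_eq,
      beq_iff_eq] at hall
    omega
  have hchars : ∀ c ∈ cs2, c.toNat < 256 := by
    intro c hc
    rcases List.mem_append.mp hc with hc | hc
    · exact hcschars c hc
    · rw [List.eq_of_mem_replicate hc]; decide
  -- A reduces to the canonical block list through binA
  have hA : prepareDes s = canonF binA M cs2 := by
    show ((PySem.List.pyRange 0 ((PySem.Int.floordiv ((PySem.Str.len s) - 1) 8 + 1) * 8) 1).foldl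
      (fun (st : List (List Int) × List Int) i =>
        let st := if PySem.Int.mod i 8 = 0 ∧ 0 < i then (st.1 ++ [st.2], ([] : List Int)) else st
        let xbin := toBinArray (((PySem.List.pyGetD ((PySem.List.pyRange 0
          (((PySem.Int.floordiv ((PySem.Str.len s) - 1) 8 + 1) * 8) - (PySem.Str.len s)) 1).foldl
            (fun acc _ => acc ++ [' ']) s.toList) i ' ').toNat : Int)) 8
        (st.1, xbin.foldl (fun p x => p ++ [x]) st.2))
      ([], ([] : List Int))).1 ++ [_] = _
    rw [hlen_s, hll, padRepl, hpad, ← hcs, ← hcs2]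
    have hfold : (PySem.List.pyRange 0 ((8 * M : Nat) : Int) 1).foldl
        (fun (st : List (List Int) × List Int) i =>
          let st := if PySem.Int.mod i 8 = 0 ∧ 0 < i then (st.1 ++ [st.2], ([] : List Int)) else st
          let xbin := toBinArray (((PySem.List.pyGetD cs2 i ' ').toNat : Int)) 8
          (st.1, xbin.foldl (fun p x => p ++ [x]) st.2))
        ([], ([] : List Int))
        = (PySem.List.enumerate cs2 0).foldl stepA ([], ([] : List Int)) := by
      rw [PySem.List.enumerate_eq_map_pyRange cs2 ' ', List.foldl_map]
      show _ = (PySem.List.pyRange 0 (PySem.List.len cs2) 1).foldl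
        (fun st j => stepA st (j, PySem.List.pyGetD cs2 j ' ')) ([], ([] : List Int))
      rw [show PySem.List.len cs2 = ((8 * M : Nat) : Int) from by
        simp [PySem.List.len, hlen2]]
      rfl
    rw [hfold]
    have hlt : (cs2.take 8).length = 8 := by simp [List.length_take]; omega
    have hld : (cs2.drop 8).length = 8 * Mm := by simp [List.length_drop]; omega
    have hside : ∀ j : Int, 0 ≤ j → j < 0 + ((cs2.take 8).length : Int) →
        ¬(PySem.Int.mod j 8 = 0 ∧ 0 < j) := by
      intro j h1 h2 hcond
      rw [PySem.Int.mod_eq_emod_of_pos (by norm_num)] at hcond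
      rw [hlt] at h2
      omega
    have hnof : (PySem.List.enumerate (cs2.take 8) 0).foldl stepA ([], ([] : List Int))
        = ([], (cs2.take 8).flatMap binA) := by
      rw [noflush (cs2.take 8) 0 [] [] hside]
      simp
    have hstart : (0 : Int) + ((cs2.take 8).length : Int) = ((8 * 1 : Nat) : Int) := by
      rw [hlt]; norm_num
    conv_lhs => rw [← List.take_append_drop 8 cs2, PySem.List.enumerate_append, List.foldl_append,
      hnof, hstart]
    rw [mainFold Mm (cs2.drop 8) 1 [] ((cs2.take 8).flatMap binA) hld le_rfl]
    rw [hMm]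
    simp [canonF]
  -- B reduces to the canonical block list through binN
  have hB : prepareDes_alt s = canonF binN M cs2 := by
    show prepareDesLoop (L + 1) cs = _
    obtain ⟨f, hfL⟩ : ∃ f, L + 1 = f + 1 := ⟨L, rfl⟩
    have hf : f = L := by omega
    rw [hfL, prepareDesLoop_eq Mm f cs hcschars (by omega) (by omega) (by omega), ← hMm, ← hL,
      ← hcs2]
  rw [hA, hB, canonCongr M cs2 hchars]

-- ===== VERDICT (by name: the statement is the Claim_ definition above) =====
theorem prepareDes_spec : Claim_unchanged_prepareDes := by
  intro s hdom hD
  exact main_eq s hdom hD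

theorem prepareDes_changed : Claim_changed_prepareDes := by unfold Claim_changed_prepareDes; decide

theorem prepareDes_tight : Claim_exact_prepareDes := by
  intro s _ hDs
  unfold D_prepareDes at hDs
  subst hDs
  decide
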